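-- pv_equiv track=rewrite | github.com/papermoonio/mkdocs-plugins | plugins/resolve_md/plugin.py | _find_selector_colon
-- ===== SOURCE A (Python) =====
-- def _find_selector_colon(reference: str) -> int | None:
--     """Return index of the last ':' separator that is not part of a scheme like 'http://'."""
--     for idx in range(len(reference) - 1, -1, -1):
--         if reference[idx] != ":":
--             continue
--         # Skip if part of '://'
--         if reference[idx : idx + 3] == "://":
--             continue
--         # Skip Windows drive letters (:'\' or :'/')
--         if idx + 1 < len(reference) and reference[idx + 1] in ("/", "\\"):
--             continue
--         # Skip double-colon sequences (handled elsewhere)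
--         if idx > 0 and reference[idx - 1] == ":":
--             continue
--         return idx
--     return None
-- ===== SOURCE B (Python) =====
-- def _find_selector_colon(reference: str) -> int | None:
--     """Return index of the last ':' separator that is not part of a scheme like 'http://'."""
--     last = None
--     n = len(reference)
--     for i, ch in enumerate(reference):
--         if ch == ":" and (i == 0 or reference[i - 1] != ":") and (i + 1 == n or reference[i + 1] not in "/\\"):
--             last = i
--     return last
-- ===== Notes on version B (the rewrite author's own statement) =====
-- stated objective: idiomatic
-- what changed: Replaced A's backward scan with early return (and its redundant '://' slice test) by a single forward enumerate pass that keeps the index of the last qualifying colon.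
import Mathlib
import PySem

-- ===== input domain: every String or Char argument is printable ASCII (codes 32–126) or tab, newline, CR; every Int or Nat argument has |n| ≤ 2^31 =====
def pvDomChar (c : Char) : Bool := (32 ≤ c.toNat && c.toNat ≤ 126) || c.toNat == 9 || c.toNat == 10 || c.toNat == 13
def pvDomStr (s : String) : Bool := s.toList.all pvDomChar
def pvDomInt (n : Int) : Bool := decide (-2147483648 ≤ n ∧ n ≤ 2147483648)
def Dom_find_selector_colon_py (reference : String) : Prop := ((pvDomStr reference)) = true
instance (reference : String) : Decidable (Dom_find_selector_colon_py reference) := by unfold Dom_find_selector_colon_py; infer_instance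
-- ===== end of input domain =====

-- B replaces A's backward early-return scan (with its redundant '://' slice test) by a
-- forward enumerate pass keeping the last qualifying colon index (idiomatic; same cost).

-- ===== PORT A =====
-- the 'for idx in range(len(reference)-1, -1, -1)' loop with its four guarded continues
def pvALoop (cs : List Char) (idxs : List Int) : Option Int :=
  match idxs with
  | [] => none
  | idx :: rest =>
    if ¬ (PySem.List.pyGet? cs idx = some ':') then pvALoop cs rest
    else if PySem.List.slice cs (some idx) (some (idx + 3)) = [':', '/', '/'] then pvALoop cs rest
    else if idx + 1 < (cs.length : Int) ∧
            (PySem.List.pyGet? cs (idx + 1) = some '/' ∨ PySem.List.pyGet? cs (idx + 1) = some '\\') then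
      pvALoop cs rest
    else if idx > 0 ∧ PySem.List.pyGet? cs (idx - 1) = some ':' then pvALoop cs rest
    else some idx

def find_selector_colon_py (reference : String) : Option Int :=
  pvALoop reference.toList (PySem.List.pyRange ((reference.toList.length : Int) - 1) (-1) (-1))

-- ===== PORT B =====
def find_selector_colon_py_alt (reference : String) : Option Int :=
  let cs := reference.toList
  let n : Int := cs.length
  (PySem.List.enumerate cs 0).foldl
    (fun last p =>
      if p.2 = ':' ∧ (p.1 = 0 ∨ ¬ (PySem.List.pyGet? cs (p.1 - 1) = some ':')) ∧
         (p.1 + 1 = n ∨ (¬ (PySem.List.pyGet? cs (p.1 + 1) = some '/') ∧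
                         ¬ (PySem.List.pyGet? cs (p.1 + 1) = some '\\')))
      then some p.1 else last)
    none

-- ===== PRECONDITION & SPEC =====
def Spec_find_selector_colon_py (reference : String) (out : Option Int) : Prop := out = find_selector_colon_py_alt reference
instance (reference : String) (out : Option Int) : Decidable (Spec_find_selector_colon_py reference out) := by unfold Spec_find_selector_colon_py; infer_instance

-- ===== CLAIM (what is proved, stated in full; the proofs are below) =====
def Claim_equal_find_selector_colon_py : Prop := ∀ (reference : String), Dom_find_selector_colon_py reference → Spec_find_selector_colon_py reference (find_selector_colon_py reference)

-- ===== LEMMAS AND PROOFS =====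

-- canonical per-index condition, on Nat indices
def pvOk (cs : List Char) (i : Nat) : Bool :=
  (cs[i]? == some ':') && !(cs[i+1]? == some '/') && !(cs[i+1]? == some '\\') &&
  (i == 0 || !(cs[i-1]? == some ':'))

theorem pvA_step (cs : List Char) (i : Nat) (hi : i < cs.length) (rest : List Int) :
    pvALoop cs ((i : Int) :: rest) = if pvOk cs i then some (i : Int) else pvALoop cs rest := by
  have hget : PySem.List.pyGet? cs (i : Int) = cs[i]? := PySem.List.pyGet?_natCast cs i
  have hgets : cs[i]? = some cs[i] := List.getElem?_eq_getElem hi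
  have h3 : ((i : Int) + 3) = ((i + 3 : Nat) : Int) := by push_cast; ring
  have h1c : ((i : Int) + 1) = ((i + 1 : Nat) : Int) := by push_cast; ring
  have hslice : PySem.List.slice cs (some (i : Int)) (some ((i : Int) + 3)) = (cs.drop i).take 3 := by
    rw [h3, PySem.List.slice_natCast]; congr 1; omega
  rw [show pvALoop cs ((i:Int)::rest) =
      (if ¬ (PySem.List.pyGet? cs (i:Int) = some ':') then pvALoop cs rest
       else if PySem.List.slice cs (some (i:Int)) (some ((i:Int) + 3)) = [':', '/', '/'] then pvALoop cs rest
       else if (i:Int) + 1 < (cs.length : Int) ∧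
            (PySem.List.pyGet? cs ((i:Int) + 1) = some '/' ∨ PySem.List.pyGet? cs ((i:Int) + 1) = some '\\') then
         pvALoop cs rest
       else if (i:Int) > 0 ∧ PySem.List.pyGet? cs ((i:Int) - 1) = some ':' then pvALoop cs rest
       else some (i:Int)) from rfl]
  rw [hget, hgets, hslice, h1c, PySem.List.pyGet?_natCast]
  by_cases hc : cs[i] = ':'
  case neg =>
    have hok : pvOk cs i = false := by simp [pvOk, hgets, hc]
    simp [hc, hok]
  case pos =>
    by_cases hsl : (cs.drop i).take 3 = [':', '/', '/']
    case pos =>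
      have hnext : cs[i+1]? = some '/' := by
        have := congrArg (fun l => l[1]?) hsl
        simpa [List.getElem?_take, List.getElem?_drop] using this
      have hok : pvOk cs i = false := by simp [pvOk, hnext]
      simp [hc, hsl, hok]
    case neg =>
      by_cases hn : cs[i+1]? = some '/' ∨ cs[i+1]? = some '\\'
      case pos =>
        have hlt : (i:Int) + 1 < (cs.length : Int) := by
          rcases hn with h | h <;>
            · obtain ⟨hlt', -⟩ := List.getElem?_eq_some_iff.mp h
              omega
        have hok : pvOk cs i = false := by
          rcases hn with h | h <;> simp [pvOk, h]
        simp [hc, hsl, hok, hlt, hn]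
      case neg =>
        rw [not_or] at hn
        by_cases hi0 : i = 0
        case pos =>
          subst hi0
          rw [List.drop_zero] at hsl
          have hok : pvOk cs 0 = true := by simp [pvOk, hgets, hc, hn.1, hn.2]
          simp [hc, hsl, hok, hn.1, hn.2]
        case neg =>
          have hm1 : ((i:Int) - 1) = ((i - 1 : Nat) : Int) := by omega
          rw [hm1, PySem.List.pyGet?_natCast]
          by_cases hp : cs[i-1]? = some ':'
          case pos =>
            have hok : pvOk cs i = false := by simp [pvOk, hp, hi0]
            simp [hc, hsl, hok, hn.1, hn.2, hp, hi0]
          case neg =>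
            have hok : pvOk cs i = true := by simp [pvOk, hgets, hc, hn.1, hn.2, hp]
            simp [hc, hsl, hok, hn.1, hn.2, hp]

theorem pvA_find (cs : List Char) (l : List Nat) (hl : ∀ i ∈ l, i < cs.length) :
    pvALoop cs (l.map Int.ofNat) = (l.find? (pvOk cs)).map Int.ofNat := by
  induction l with
  | nil => rfl
  | cons x xs ih =>
    have hx : x < cs.length := hl x (by simp)
    simp only [List.map_cons, Int.ofNat_eq_natCast, List.find?_cons]
    rw [pvA_step cs x hx]
    by_cases h : pvOk cs x
    · simp [h]
    · simp only [h, Bool.false_eq_true, ite_false]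
      exact ih (fun i hi => hl i (by simp [hi]))

-- descending index list
theorem pvRange_desc (n : Nat) :
    PySem.List.pyRange ((n : Int) - 1) (-1) (-1) =
      ((List.range n).map (fun k => n - 1 - k)).map Int.ofNat := by
  rw [PySem.List.pyRange_neg_one, List.map_map]
  have : ((n : Int) - 1 - (-1)).toNat = n := by omega
  rw [this]
  refine List.map_congr_left (fun k hk => ?_)
  have := List.mem_range.mp hk
  simp only [Function.comp_apply, Int.ofNat_eq_natCast]
  omega

theorem pvB_fold' (C : Int × Char → Prop) [DecidablePred C] (l : List (Int × Char)) (a : Option Int) :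
    l.foldl (fun acc x => if C x then some x.1 else acc) a =
      match l.reverse.find? (fun x => decide (C x)) with
      | some x => some x.1
      | none => a := by
  induction l generalizing a with
  | nil => rfl
  | cons x xs ih =>
    rw [List.foldl_cons, ih, List.reverse_cons, List.find?_append]
    by_cases h : C x <;> cases hfind : xs.reverse.find? (fun x => decide (C x)) <;> simp_all

theorem pvB_cond (cs : List Char) (i : Nat) (hi : i < cs.length) :
    decide ((PySem.List.pyGetD cs (i : Int) ' ') = ':' ∧
      ((i : Int) = 0 ∨ ¬ (PySem.List.pyGet? cs ((i : Int) - 1) = some ':')) ∧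
      ((i : Int) + 1 = (cs.length : Int) ∨
        (¬ (PySem.List.pyGet? cs ((i : Int) + 1) = some '/') ∧
         ¬ (PySem.List.pyGet? cs ((i : Int) + 1) = some '\\')))) = pvOk cs i := by
  have hgets : cs[i]? = some cs[i] := List.getElem?_eq_getElem hi
  have hd : PySem.List.pyGetD cs (i : Int) ' ' = cs[i] := by
    rw [PySem.List.pyGetD_natCast, List.getD_eq_getElem?_getD, hgets]; rfl
  have h1c : ((i : Int) + 1) = ((i + 1 : Nat) : Int) := by push_cast; ring
  rw [Bool.eq_iff_iff, hd, h1c, PySem.List.pyGet?_natCast]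
  by_cases hi0 : i = 0
  · subst hi0
    by_cases hn : (1 : Nat) = cs.length
    · have : cs[1]? = none := by rw [List.getElem?_eq_none_iff]; omega
      simp [pvOk, ← hn]
    · have hne : (1 : Int) ≠ (cs.length : Int) := by omega
      simp [pvOk, hgets]
      tauto
  · have hm1 : ((i : Int) - 1) = ((i - 1 : Nat) : Int) := by omega
    rw [hm1, PySem.List.pyGet?_natCast]
    by_cases hn : i + 1 = cs.length
    · have h2 : cs[i+1]? = none := by rw [List.getElem?_eq_none_iff]; omega
      simp [pvOk, hgets, hn]
    · have hne : ((i : Nat) : Int) + 1 ≠ (cs.length : Int) := by omega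
      simp [pvOk, hgets, hi0]
      tauto

theorem pvFind_congr {α : Type} (p q : α → Bool) (l : List α) (h : ∀ a ∈ l, p a = q a) :
    l.find? p = l.find? q := by
  induction l with
  | nil => rfl
  | cons x xs ih =>
    rw [List.find?_cons, List.find?_cons, h x (by simp)]
    cases hq : q x
    · exact ih (fun a ha => h a (by simp [ha]))
    · rfl

theorem find_selector_colon_py_spec' (reference : String) :
    find_selector_colon_py reference = find_selector_colon_py_alt reference := by
  unfold find_selector_colon_py find_selector_colon_py_alt
  set cs := reference.toList with hcs
  set dl : List Nat := (List.range cs.length).map (fun k => cs.length - 1 - k) with hdl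
  have hmem : ∀ i ∈ dl, i < cs.length := by
    intro i hi
    rw [hdl] at hi
    obtain ⟨k, hk, rfl⟩ := List.mem_map.mp hi
    have := List.mem_range.mp hk
    omega
  -- A side
  rw [pvRange_desc, pvA_find cs dl hmem]
  -- B side
  rw [pvB_fold' _ (PySem.List.enumerate cs 0) none,
      PySem.List.enumerate_eq_map_pyRange cs ' ']
  have hrev : (PySem.List.pyRange 0 (PySem.List.len cs)).reverse = dl.map Int.ofNat := by
    have h1 := PySem.List.pyRange_neg_one_eq_reverse ((cs.length : Int) - 1) (-1)
    have h2 : ((-1 : Int) + 1) = 0 := by ring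
    have h3 : ((cs.length : Int) - 1 + 1) = (cs.length : Int) := by ring
    rw [h2, h3] at h1
    rw [show PySem.List.len cs = (cs.length : Int) from PySem.List.len_eq cs, ← h1,
        pvRange_desc, hdl]
  rw [← List.map_reverse, hrev, List.map_map]
  conv_rhs => rw [List.find?_map]
  have hcongr := pvFind_congr
      ((fun x : Int × Char =>
          decide
            (x.2 = ':' ∧
              (x.1 = 0 ∨ ¬PySem.List.pyGet? cs (x.1 - 1) = some ':') ∧
                (x.1 + 1 = (cs.length : Int) ∨
                  ¬PySem.List.pyGet? cs (x.1 + 1) = some '/' ∧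
                  ¬PySem.List.pyGet? cs (x.1 + 1) = some '\\'))) ∘
        (fun j => (j, PySem.List.pyGetD cs j ' ')) ∘ Int.ofNat)
      (pvOk cs) dl
      (by intro i hi
          simpa [Function.comp, Int.ofNat_eq_natCast] using pvB_cond cs i (hmem i hi))
  rw [hcongr]
  cases hf : dl.find? (pvOk cs) with
  | none => rfl
  | some j => rfl

-- ===== VERDICT (by name: the statement is the Claim_ definition above) =====
theorem find_selector_colon_py_spec : Claim_equal_find_selector_colon_py := by
  intro reference _
  exact find_selector_colon_py_spec' reference
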